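-- pv_equiv track=rewrite | github.com/ntsxtx35/ass2 | placing_order.py | get_order_dict
-- ===== SOURCE A (Python) =====
-- def get_order_dict(order_lst):
--     """
--     This function is used to create a dictionary of customer order
--     :param order_lst: A list of customer order
--     :return: A dictionary of customer order
--     """
--     order_dict = {}
--     # Loop through each order in the order list
--     for sub_order in order_lst:
--         if sub_order[0] in order_dict:
--             order_dict[sub_order[0]] += sub_order[1]
--         else:
--             order_dict[sub_order[0]] = sub_order[1]
--     return order_dict
-- ===== SOURCE B (Python) =====
-- def get_order_dict(order_lst):
--     """Group-then-aggregate: distinct keys in first-appearance order, then one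
--     scan per key collecting its quantities, combined left-to-right with +."""
--     keys = dict.fromkeys(o[0] for o in order_lst)
--     result = {}
--     for k in keys:
--         matched = [o[1] for o in order_lst if o[0] == k]
--         acc = matched[0]
--         for v in matched[1:]:
--             acc = acc + v
--         result[k] = acc
--     return result
-- ===== Notes on version B (the rewrite author's own statement) =====
-- stated objective: alternative
-- what changed: Replaces A's single accumulating dict pass (membership test + in-place +=) by a group-then-aggregate scheme: dedup the keys in first-appearance order, then for each key scan the list collecting its quantities and reduce them left-to-right with +.
import Mathlib
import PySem

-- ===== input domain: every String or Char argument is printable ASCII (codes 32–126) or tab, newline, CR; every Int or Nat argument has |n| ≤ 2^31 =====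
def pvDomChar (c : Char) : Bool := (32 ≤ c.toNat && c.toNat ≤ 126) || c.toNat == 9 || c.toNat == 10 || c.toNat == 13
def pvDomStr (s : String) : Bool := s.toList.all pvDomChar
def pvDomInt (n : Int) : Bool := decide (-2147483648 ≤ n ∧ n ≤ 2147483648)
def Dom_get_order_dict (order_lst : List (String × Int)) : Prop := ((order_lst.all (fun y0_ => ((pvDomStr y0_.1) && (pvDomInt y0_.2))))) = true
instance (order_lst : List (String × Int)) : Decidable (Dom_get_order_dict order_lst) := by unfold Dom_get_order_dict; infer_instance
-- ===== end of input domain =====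

-- B replaces A's single accumulating dict pass by dedup-the-keys + one collecting scan and
-- left-to-right reduction per key (alternative decomposition, not claimed faster).

-- ===== PORT A =====
-- A: one pass; `order_dict[k] += v` if k present, otherwise `order_dict[k] = v`.
def get_order_dict (order_lst : List (String × Int)) : List (String × Int) :=
  (order_lst.foldl
    (fun d sub_order =>
      if d.contains sub_order.1 then
        d.modify sub_order.1 0 (· + sub_order.2)   -- order_dict[k] += v (key present, so default unused)
      else
        d.insert sub_order.1 sub_order.2)
    (PySem.Dict.empty : PySem.Dict String Int)).items

-- ===== PORT B =====
-- B: keys = dict.fromkeys(...) → dedup; per key: collect matched quantities, reduce from the head.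
def get_order_dict_alt (order_lst : List (String × Int)) : List (String × Int) :=
  (PySem.List.dedup (order_lst.map (·.1))).map (fun k =>
    (k,
      match (order_lst.filter (fun o => o.1 == k)).map (·.2) with
      | [] => 0               -- unreachable: k comes from order_lst (Source B's matched[0] would raise)
      | m :: rest => rest.foldl (· + ·) m))

-- ===== PRECONDITION & SPEC =====
def Spec_get_order_dict (order_lst : List (String × Int)) (out : List (String × Int)) : Prop := out = get_order_dict_alt order_lst
instance (order_lst : List (String × Int)) (out : List (String × Int)) : Decidable (Spec_get_order_dict order_lst out) := by unfold Spec_get_order_dict; infer_instance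

-- ===== CLAIM (what is proved, stated in full; the proofs are below) =====
def Claim_equal_get_order_dict : Prop := ∀ (order_lst : List (String × Int)), Dom_get_order_dict order_lst → Spec_get_order_dict order_lst (get_order_dict order_lst)

-- ===== LEMMAS AND PROOFS =====

-- A's loop body, abbreviated for the lemmas below.
def pvStep (d : PySem.Dict String Int) (o : String × Int) : PySem.Dict String Int :=
  if d.contains o.1 then d.modify o.1 0 (· + o.2) else d.insert o.1 o.2

lemma pvStep_keys (d : PySem.Dict String Int) (o : String × Int) :
    (pvStep d o).keys = PySem.Set.add d.keys o.1 := by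
  unfold pvStep
  by_cases h : d.contains o.1
  · rw [if_pos h, PySem.Dict.keys_modify, PySem.Dict.keys_insert_of_contains _ _ h]
    have hm : o.1 ∈ d.keys := (PySem.Dict.contains_iff_mem_keys d o.1).1 h
    simp [PySem.Set.add, hm]
  · rw [if_neg h, PySem.Dict.keys_insert_of_not_contains _ _ (by simpa using h)]
    have hm : o.1 ∉ d.keys := fun hx => h ((PySem.Dict.contains_iff_mem_keys d o.1).2 hx)
    simp [PySem.Set.add, hm]

lemma pvStep_keys_nodup (d : PySem.Dict String Int) (o : String × Int)
    (h : d.keys.Nodup) : (pvStep d o).keys.Nodup := by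
  unfold pvStep
  by_cases hc : d.contains o.1
  · rw [if_pos hc, PySem.Dict.keys_modify, PySem.Dict.keys_insert_of_contains _ _ hc]
    exact h
  · exact if_neg hc ▸ PySem.Dict.nodup_keys_insert d o.1 o.2 h

lemma pvFold_nodup (l : List (String × Int)) (d : PySem.Dict String Int)
    (h : d.keys.Nodup) : (l.foldl pvStep d).keys.Nodup := by
  induction l generalizing d with
  | nil => exact h
  | cons o l ih => exact ih _ (pvStep_keys_nodup d o h)

lemma pvFold_keys (l : List (String × Int)) (d : PySem.Dict String Int) :
    (l.foldl pvStep d).keys = PySem.Set.update d.keys (l.map (·.1)) := by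
  induction l generalizing d with
  | nil => simp [PySem.Set.update]
  | cons o l ih =>
      rw [List.foldl_cons, ih, pvStep_keys]
      simp [PySem.Set.update]

lemma pvStep_getD (d : PySem.Dict String Int) (o : String × Int) (k : String) :
    (pvStep d o).getD k 0 = d.getD k 0 + (if o.1 = k then o.2 else 0) := by
  unfold pvStep
  by_cases hc : d.contains o.1
  · rw [if_pos hc, PySem.Dict.getD_modify]
    by_cases hk : o.1 = k
    · simp [hk]
    · simp [hk, Ne.symm hk]
  · rw [if_neg hc, PySem.Dict.getD_insert]
    by_cases hk : o.1 = k
    · subst hk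
      rw [PySem.Dict.getD_of_not_contains d 0 (by simpa using hc)]
      simp
    · simp [hk, Ne.symm hk]

lemma pvFold_getD (l : List (String × Int)) (d : PySem.Dict String Int) (k : String) :
    (l.foldl pvStep d).getD k 0 =
      d.getD k 0 + ((l.filter (fun o => o.1 == k)).map (·.2)).sum := by
  induction l generalizing d with
  | nil => simp
  | cons o l ih =>
      rw [List.foldl_cons, ih, pvStep_getD]
      by_cases hk : o.1 = k
      · simp [hk]; ring
      · simp [hk]

-- a dict with nodup keys is determined by its keys and getD
lemma pvItems_eq_keys_map (d : PySem.Dict String Int) (h : d.keys.Nodup) :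
    d.items = d.keys.map (fun k => (k, d.getD k 0)) := by
  have hk : d.keys = d.items.map (·.1) := by simp only [PySem.Dict.keys]
  rw [hk, List.map_map]
  conv_lhs => rw [← List.map_id d.items]
  refine List.map_congr_left (fun p hp => ?_)
  obtain ⟨a, b⟩ := p
  simp only [id, Function.comp]
  exact congrArg _ ((PySem.Dict.getD_of_mem_items d hp h 0).symm)

-- ===== VERDICT (by name: the statement is the Claim_ definition above) =====
theorem get_order_dict_spec : Claim_equal_get_order_dict := by
  intro l _
  unfold Spec_get_order_dict
  show (List.foldl pvStep (PySem.Dict.empty : PySem.Dict String Int) l).items = _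
  rw [pvItems_eq_keys_map _ (pvFold_nodup l _ (by simp [PySem.Dict.keys_empty])),
      pvFold_keys, PySem.Dict.keys_empty]
  unfold get_order_dict_alt
  have hset : PySem.Set.update ([] : PySem.Set String) (l.map (·.1))
      = PySem.List.dedup (l.map (·.1)) := by
    simp [PySem.List.dedup_eq_ofList]
    rfl
  rw [hset]
  refine List.map_congr_left (fun k hk => ?_)
  rw [pvFold_getD]
  have hmem : k ∈ l.map (·.1) := (PySem.List.mem_dedup _ _).1 hk
  obtain ⟨o, ho, rfl⟩ := List.mem_map.1 hmem
  have hne : (l.filter (fun p => p.1 == o.1)).map (·.2) ≠ [] := by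
    simp only [ne_eq, List.map_eq_nil_iff, List.filter_eq_nil_iff]
    push Not
    exact ⟨o, ho, by simp⟩
  obtain ⟨m, rest, hmr⟩ := List.exists_cons_of_ne_nil hne
  rw [hmr]
  have : rest.foldl (· + ·) m = m + rest.sum := by
    simpa using PySem.List.foldl_add rest id m
  simp [this, PySem.Dict.getD_empty]
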